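-- pv_equiv track=rewrite | github.com/Roman-DL/bz2-video-transcriber | backend/app/services/text_splitter.py | _get_overlap_sentences
-- ===== SOURCE A (Python) =====
-- def _get_overlap_sentences(
--     sentences: list[str], target_overlap: int
-- ) -> list[str]:
--     """
--     Get sentences for overlap from end of part.
--
--     Accumulates sentences from the end until reaching target overlap size.
--
--     Args:
--         sentences: All sentences in current part
--         target_overlap: Target overlap size in characters
--
--     Returns:
--         List of sentences to include as overlap
--     """
--     overlap: list[str] = []
--     overlap_length = 0
--
--     for sentence in reversed(sentences):
--         sentence_length = len(sentence) + 1  # +1 for space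
--         if overlap_length + sentence_length > target_overlap and overlap:
--             break
--         overlap.insert(0, sentence)
--         overlap_length += sentence_length
--
--     return overlap
-- ===== SOURCE B (Python) =====
-- def _get_overlap_sentences(
--     sentences: list[str], target_overlap: int
-- ) -> list[str]:
--     # Cumulative char budgets of trailing sentences, then slice off one tail.
--     sums = []
--     total = 0
--     for s in reversed(sentences):
--         total += len(s) + 1  # +1 for space
--         sums.append(total)
--     k = 1  # the last sentence is always kept
--     while k < len(sums) and sums[k] <= target_overlap:
--         k += 1
--     return sentences[len(sentences) - k:]
-- ===== Notes on version B (the rewrite author's own statement) =====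
-- stated objective: alternative
-- what changed: Replaces the incremental insert(0,...) accumulation with a suffix cumulative-sums table, a cut-index scan over that table, and a single tail slice of the input.
import Mathlib
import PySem

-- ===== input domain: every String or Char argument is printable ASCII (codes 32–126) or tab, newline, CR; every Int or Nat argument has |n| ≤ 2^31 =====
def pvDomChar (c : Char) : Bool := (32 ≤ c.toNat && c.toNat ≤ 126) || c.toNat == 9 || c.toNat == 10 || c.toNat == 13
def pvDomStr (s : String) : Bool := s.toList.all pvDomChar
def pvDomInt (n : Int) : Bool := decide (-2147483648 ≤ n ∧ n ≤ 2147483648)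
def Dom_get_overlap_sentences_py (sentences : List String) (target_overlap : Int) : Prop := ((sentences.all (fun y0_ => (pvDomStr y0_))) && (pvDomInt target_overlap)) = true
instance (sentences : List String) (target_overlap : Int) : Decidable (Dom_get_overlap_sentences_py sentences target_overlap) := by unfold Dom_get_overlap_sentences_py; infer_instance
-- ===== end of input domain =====

-- B builds a suffix cumulative-sums table, scans it for the cut index, and slices the tail;
-- A accumulates by prepending. Equivalence is proved for all inputs (objective: alternative).

-- ===== PORT A =====
-- the for-loop over reversed(sentences) with the 'break' (state: overlap, overlap_length)
def aLoop (target_overlap : Int) : List String → List String → Int → List String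
  | [], overlap, _ => overlap
  | s :: rest, overlap, overlap_length =>
    let sentence_length : Int := PySem.Str.len s + 1
    if overlap_length + sentence_length > target_overlap ∧ overlap ≠ [] then overlap
    else aLoop target_overlap rest (s :: overlap) (overlap_length + sentence_length)

def get_overlap_sentences_py (sentences : List String) (target_overlap : Int) : List String :=
  aLoop target_overlap sentences.reverse [] 0

-- ===== PORT B =====
-- the first pass of Source B: cumulative lengths (len+1 each) of reversed(sentences)
def altSums (sentences : List String) : List Int :=
  (sentences.reverse.foldl
    (fun (acc : List Int × Int) s =>
      let total := acc.2 + (PySem.Str.len s + 1)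
      (acc.1 ++ [total], total))
    ([], 0)).1

-- the while loop: advance k while k < len(sums) and sums[k] <= target_overlap
def altK (sums : List Int) (target_overlap : Int) (k : Nat) : Nat :=
  if k < sums.length ∧ sums.getD k 0 ≤ target_overlap then altK sums target_overlap (k + 1)
  else k
termination_by sums.length - k
decreasing_by omega

def get_overlap_sentences_py_alt (sentences : List String) (target_overlap : Int) : List String :=
  let sums := altSums sentences
  let k := altK sums target_overlap 1
  -- sentences[len(sentences)-k:]: here k ≤ len when sentences ≠ [] and the slice of [] is [],
  -- so the clamped Nat subtraction in List.drop is exact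
  sentences.drop (sentences.length - k)

-- ===== PRECONDITION & SPEC =====
def Spec_get_overlap_sentences_py (sentences : List String) (target_overlap : Int) (out : List String) : Prop := out = get_overlap_sentences_py_alt sentences target_overlap
instance (sentences : List String) (target_overlap : Int) (out : List String) : Decidable (Spec_get_overlap_sentences_py sentences target_overlap out) := by unfold Spec_get_overlap_sentences_py; infer_instance

-- ===== CLAIM (what is proved, stated in full; the proofs are below) =====
def Claim_equal_get_overlap_sentences_py : Prop := ∀ (sentences : List String) (target_overlap : Int), Dom_get_overlap_sentences_py sentences target_overlap → Spec_get_overlap_sentences_py sentences target_overlap (get_overlap_sentences_py sentences target_overlap)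

-- ===== LEMMAS AND PROOFS =====

-- greedy take-while-within-budget, the abstract form of A's loop once overlap is nonempty
def gtw (target : Int) : List String → Int → List String
  | [], _ => []
  | s :: rest, acc =>
    if acc + (PySem.Str.len s + 1) > target then []
    else s :: gtw target rest (acc + (PySem.Str.len s + 1))

lemma aLoop_eq_gtw (target : Int) (l : List String) (ov : List String) (acc : Int)
    (h : ov ≠ []) : aLoop target l ov acc = (gtw target l acc).reverse ++ ov := by
  induction l generalizing ov acc with
  | nil => simp [aLoop, gtw]
  | cons s rest ih =>
    simp only [aLoop, gtw, PySem.Str.len_eq, gt_iff_lt, ne_eq, h, not_false_eq_true, and_true]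
    split
    · simp
    · rw [ih _ _ (by simp)]
      simp

lemma gtw_eq_take (target : Int) (l : List String) (acc : Int) :
    gtw target l acc = l.take (gtw target l acc).length := by
  induction l generalizing acc with
  | nil => simp [gtw]
  | cons s rest ih =>
    simp only [gtw]
    split
    · simp
    · simp only [List.length_cons, List.take_succ_cons, List.cons.injEq, true_and]
      exact ih _

-- explicit cumulative sums, and the bridge to the foldl in altSums
def csums (target? : Unit) : List String → Int → List Int
  | [], _ => []
  | s :: rest, c => (c + (PySem.Str.len s + 1)) :: csums target? rest (c + (PySem.Str.len s + 1))

lemma altSums_foldl (l : List String) (pre : List Int) (c : Int) :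
    l.foldl (fun (acc : List Int × Int) s =>
      let total := acc.2 + (PySem.Str.len s + 1)
      (acc.1 ++ [total], total)) (pre, c)
    = (pre ++ csums () l c, (csums () l c).getLastD c) := by
  induction l generalizing pre c with
  | nil => simp [csums]
  | cons s rest ih =>
    simp only [List.foldl_cons, csums, ih, List.getLastD_cons]
    simp

lemma altSums_eq (sentences : List String) :
    altSums sentences = csums () sentences.reverse 0 := by
  rw [altSums, altSums_foldl]
  simp

lemma altK_eq (sums : List Int) (target : Int) (k : Nat) :
    altK sums target k = k + ((sums.drop k).takeWhile (fun t => t ≤ target)).length := by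
  rw [altK]
  split
  next h =>
    obtain ⟨hk, hle⟩ := h
    rw [altK_eq sums target (k + 1)]
    rw [List.drop_eq_getElem_cons hk,
      List.takeWhile_cons_of_pos (by simp; rw [List.getD_eq_getElem _ _ hk] at hle; omega)]
    simp only [List.length_cons]
    omega
  next h =>
    rcases Nat.lt_or_ge k sums.length with hk | hk
    · have hle : ¬ sums.getD k 0 ≤ target := by tauto
      rw [List.drop_eq_getElem_cons hk,
        List.takeWhile_cons_of_neg (by simp; rw [List.getD_eq_getElem _ _ hk] at hle; omega)]
      simp
    · rw [List.drop_eq_nil_of_le hk]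
      simp
termination_by sums.length - k
decreasing_by omega

lemma takeWhile_csums (target : Int) (l : List String) (c : Int) :
    ((csums () l c).takeWhile (fun t => t ≤ target)).length = (gtw target l c).length := by
  induction l generalizing c with
  | nil => simp [csums, gtw]
  | cons s rest ih =>
    by_cases hc : c + ((s.length : Int) + 1) ≤ target
    · rw [csums, List.takeWhile_cons_of_pos (by simp [PySem.Str.len_eq]; omega),
        gtw, if_neg (by simp [PySem.Str.len_eq]; omega)]
      simp [ih]
    · rw [csums, List.takeWhile_cons_of_neg (by simp [PySem.Str.len_eq]; omega),
        gtw, if_pos (by simp [PySem.Str.len_eq]; omega)]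
      rfl

lemma drop_sub_eq_reverse_take (l : List String) (k : Nat) :
    l.drop (l.length - k) = (l.reverse.take k).reverse := by
  rw [List.take_reverse]
  simp

-- ===== VERDICT (by name: the statement is the Claim_ definition above) =====
theorem get_overlap_sentences_py_spec : Claim_equal_get_overlap_sentences_py := by
  intro sentences target _
  unfold Spec_get_overlap_sentences_py
  rcases hrev : sentences.reverse with _ | ⟨s, rest⟩
  · have hs : sentences = [] := by simpa using hrev
    subst hs
    simp [get_overlap_sentences_py, get_overlap_sentences_py_alt, aLoop, altSums, altK]
  · have hA : get_overlap_sentences_py sentences target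
        = (gtw target rest (0 + (PySem.Str.len s + 1))).reverse ++ [s] := by
      rw [get_overlap_sentences_py, hrev, aLoop, if_neg (by simp),
        aLoop_eq_gtw _ _ _ _ (by simp)]
    have hk : altK (altSums sentences) target 1
        = 1 + (gtw target rest (0 + (PySem.Str.len s + 1))).length := by
      rw [altSums_eq, hrev, altK_eq, csums]
      simp only [List.drop_succ_cons, List.drop_zero]
      rw [takeWhile_csums]
    simp only [get_overlap_sentences_py_alt]
    rw [hA, hk, drop_sub_eq_reverse_take, hrev]
    rw [Nat.add_comm 1, List.take_succ_cons]
    conv_lhs => rw [gtw_eq_take]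
    simp
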